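-- pv_equiv track=rewrite | github.com/0815Sailsman/ScavStats | image_compare.py | calc_closest_val
-- ===== SOURCE A (Python) =====
-- def calc_closest_val(p_dict, check_max):
--     result = {}
--     if check_max:
--         closest = max(p_dict.values())
--     else:
--         closest = min(p_dict.values())
--
--     for key, value in p_dict.items():
--         if value == closest:
--             result[key] = closest
--
--     return result
-- ===== SOURCE B (Python) =====
-- def calc_closest_val(p_dict, check_max):
--     result = {}
--     have = False
--     closest = None
--     for key, value in p_dict.items():
--         if not have or (value > closest if check_max else value < closest):
--             have = True
--             closest = value
--             result = {key: closest}
--         elif value == closest: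
--             result[key] = closest
--     return result
-- ===== Notes on version B (the rewrite author's own statement) =====
-- stated objective: alternative
-- what changed: B makes a single pass over the items, maintaining the running extremal value and resetting/extending the result dict as it goes, instead of A's two passes (max/min over values, then a filtering loop).
import Mathlib
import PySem

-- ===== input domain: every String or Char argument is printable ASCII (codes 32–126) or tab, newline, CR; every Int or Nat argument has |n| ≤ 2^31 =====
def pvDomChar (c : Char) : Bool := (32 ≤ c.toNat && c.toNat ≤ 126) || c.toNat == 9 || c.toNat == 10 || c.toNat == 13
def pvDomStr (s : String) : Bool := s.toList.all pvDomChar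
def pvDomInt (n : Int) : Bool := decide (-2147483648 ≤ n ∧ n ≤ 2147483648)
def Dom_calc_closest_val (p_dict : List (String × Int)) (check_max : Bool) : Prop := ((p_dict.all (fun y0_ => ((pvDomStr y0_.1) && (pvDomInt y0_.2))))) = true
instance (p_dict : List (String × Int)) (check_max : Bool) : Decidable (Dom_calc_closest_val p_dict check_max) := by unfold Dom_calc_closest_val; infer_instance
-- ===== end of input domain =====

-- B does the same job in ONE pass (running extremum + incremental result) instead of A's two passes; same O(n) cost.
-- ===== PORT A =====
def calc_closest_val (p_dict : List (String × Int)) (check_max : Bool) : List (String × Int) :=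
  match (if check_max then PySem.List.max? (p_dict.map Prod.snd) (fun y => y)
         else PySem.List.min? (p_dict.map Prod.snd) (fun y => y)) with
  | none => []   -- unreachable under Pre_: max()/min() of an empty sequence raises ValueError
  | some closest =>
    (p_dict.foldl
      (fun (res : PySem.Dict String Int) kv =>
        if kv.2 == closest then res.insert kv.1 closest else res)
      PySem.Dict.empty).items

-- ===== PORT B =====
def calcClosestLoop (cm : Bool) : List (String × Int) → Int → List (String × Int) → List (String × Int)
  | [], _, res => res
  | (k, v) :: t, c, res =>
    if (cm && decide (c < v)) || (!cm && decide (v < c)) then calcClosestLoop cm t v [(k, v)]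
    else if v == c then calcClosestLoop cm t c (res ++ [(k, c)])
    else calcClosestLoop cm t c res

def calc_closest_val_alt (p_dict : List (String × Int)) (check_max : Bool) : List (String × Int) :=
  match p_dict with
  | [] => []
  | (k, v) :: t => calcClosestLoop check_max t v [(k, v)]

-- ===== PRECONDITION & SPEC =====
-- Pre_ excludes (a) the empty dict, on which A raises ValueError, and (b) association lists with
-- duplicate keys, which cannot arise from a Python dict argument (representation artifact).
def Pre_calc_closest_val (p_dict : List (String × Int)) (check_max : Bool) : Prop :=
  p_dict ≠ [] ∧ (p_dict.map Prod.fst).Nodup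
instance (p_dict : List (String × Int)) (check_max : Bool) : Decidable (Pre_calc_closest_val p_dict check_max) := by unfold Pre_calc_closest_val; infer_instance
def pvWitness_calc_closest_val : (List (String × Int)) × Bool := ([("a", 3), ("b", 5), ("c", 5)], true)

def Spec_calc_closest_val (p_dict : List (String × Int)) (check_max : Bool) (out : List (String × Int)) : Prop := out = calc_closest_val_alt p_dict check_max
instance (p_dict : List (String × Int)) (check_max : Bool) (out : List (String × Int)) : Decidable (Spec_calc_closest_val p_dict check_max out) := by unfold Spec_calc_closest_val; infer_instance

-- ===== CLAIM (what is proved, stated in full; the proofs are below) =====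
def Claim_equal_calc_closest_val : Prop := ∀ (p_dict : List (String × Int)) (check_max : Bool), Dom_calc_closest_val p_dict check_max → Pre_calc_closest_val p_dict check_max → Spec_calc_closest_val p_dict check_max (calc_closest_val p_dict check_max)

-- ===== LEMMAS AND PROOFS =====

-- running extremum of A's max()/min() loop, shared shape with B's comparison
def pvExt (cm : Bool) (c : Int) (vs : List Int) : Int :=
  vs.foldl (fun a v => if (cm && decide (a < v)) || (!cm && decide (v < a)) then v else a) c

theorem pvExt_nil (cm : Bool) (c : Int) : pvExt cm c [] = c := rfl

theorem pvExt_cons (cm : Bool) (c v : Int) (vs : List Int) :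
    pvExt cm c (v :: vs) =
      pvExt cm (if (cm && decide (c < v)) || (!cm && decide (v < c)) then v else c) vs := rfl

-- the running extremum is at least as good as the seed
theorem pvExt_le (vs : List Int) : ∀ c : Int, pvExt false c vs ≤ c := by
  induction vs with
  | nil => intro c; rw [pvExt_nil]
  | cons v t ih =>
    intro c
    rw [pvExt_cons]
    split_ifs with h
    · simp at h; have := ih v; omega
    · exact ih c

theorem pvExt_ge (vs : List Int) : ∀ c : Int, c ≤ pvExt true c vs := by
  induction vs with
  | nil => intro c; rw [pvExt_nil]
  | cons v t ih =>
    intro c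
    rw [pvExt_cons]
    split_ifs with h
    · simp at h; have := ih v; omega
    · exact ih c

theorem pvExt_eq_foldl_max (c : Int) (vs : List Int) :
    pvExt true c vs = vs.foldl max c := by
  induction vs generalizing c with
  | nil => rfl
  | cons v t ih =>
    rw [pvExt_cons, List.foldl_cons, ih]
    congr 1
    simp only [Bool.true_and, Bool.not_true, Bool.false_and, Bool.or_false, decide_eq_true_eq]
    split_ifs with h <;> omega

theorem pvExt_eq_foldl_min (c : Int) (vs : List Int) :
    pvExt false c vs = vs.foldl min c := by
  induction vs generalizing c with
  | nil => rfl
  | cons v t ih =>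
    rw [pvExt_cons, List.foldl_cons, ih]
    congr 1
    simp only [Bool.false_and, Bool.not_false, Bool.true_and, Bool.false_or, decide_eq_true_eq]
    split_ifs with h <;> omega

-- B's loop computes the A-style "filter by the overall extremum", with res carried when the seed stays extremal
theorem calcClosestLoop_spec (cm : Bool) (t : List (String × Int)) : ∀ (c : Int) (res : List (String × Int)),
    calcClosestLoop cm t c res =
      (if pvExt cm c (t.map Prod.snd) = c then res else [])
        ++ (t.filter (fun kv => kv.2 == pvExt cm c (t.map Prod.snd))).map
            (fun kv => (kv.1, pvExt cm c (t.map Prod.snd))) := by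
  induction t with
  | nil => intro c res; simp [calcClosestLoop, pvExt_nil]
  | cons kv t ih =>
    intro c res
    obtain ⟨k, v⟩ := kv
    rw [calcClosestLoop]
    by_cases hb : ((cm && decide (c < v)) || (!cm && decide (v < c))) = true
    · rw [if_pos hb, ih]
      have hm : pvExt cm c ((v :: t.map Prod.snd)) = pvExt cm v (t.map Prod.snd) := by
        rw [pvExt_cons, if_pos hb]
      have hne : pvExt cm v (t.map Prod.snd) ≠ c := by
        cases cm
        · have := pvExt_le (t.map Prod.snd) v; simp at hb; omega
        · have := pvExt_ge (t.map Prod.snd) v; simp at hb; omega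
      simp only [List.map_cons, hm, List.filter_cons, List.map_cons]
      rw [if_neg hne]
      by_cases hv : v = pvExt cm v (t.map Prod.snd)
      · rw [← hv]; simp
      · have hb2 : (v == pvExt cm v (t.map Prod.snd)) = false := by
          simp only [beq_eq_false_iff_ne, ne_eq]; exact hv
        simp [hb2, Ne.symm hv]
    · rw [if_neg hb]
      have hm : pvExt cm c ((v :: t.map Prod.snd)) = pvExt cm c (t.map Prod.snd) := by
        rw [pvExt_cons, if_neg hb]
      by_cases hv : (v == c)
      · rw [if_pos hv, ih]
        have hvc : v = c := by simpa using hv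
        simp only [List.map_cons, hm, List.filter_cons]
        by_cases hc : pvExt cm c (t.map Prod.snd) = c
        · have : (v == pvExt cm c (t.map Prod.snd)) = true := by simp [hvc, hc]
          simp [this, hc, hvc]
        · have hb2 : (v == pvExt cm c (t.map Prod.snd)) = false := by
            simp only [beq_eq_false_iff_ne, ne_eq]
            cases cm
            · have := pvExt_le (t.map Prod.snd) c; omega
            · have := pvExt_ge (t.map Prod.snd) c; omega
          simp [hb2, hc]
      · rw [if_neg hv, ih]
        have hvc : v ≠ c := by simpa using hv
        have hne : (v == pvExt cm c (t.map Prod.snd)) = false := by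
          simp only [beq_eq_false_iff_ne, ne_eq]
          cases cm
          · have := pvExt_le (t.map Prod.snd) c; simp at hb; omega
          · have := pvExt_ge (t.map Prod.snd) c; simp at hb; omega
        simp only [List.map_cons, hm, List.filter_cons, hne]
        simp

-- A's accumulation loop over fresh distinct keys appends exactly the filtered entries
theorem aFold_items (closest : Int) (l : List (String × Int)) :
    ∀ (d : PySem.Dict String Int), d.keys.Nodup →
      (∀ x ∈ l, d.contains x.1 = false) → (l.map Prod.fst).Nodup →
    (l.foldl
      (fun (res : PySem.Dict String Int) kv =>
        if kv.2 == closest then res.insert kv.1 closest else res) d).items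
      = d.items ++ (l.filter (fun kv => kv.2 == closest)).map (fun kv => (kv.1, closest)) := by
  induction l with
  | nil => intro d _ _ _; simp
  | cons kv t ih =>
    intro d hnd hfresh hlnd
    obtain ⟨k, v⟩ := kv
    have hkf : d.contains k = false := hfresh (k, v) (by simp)
    rw [List.foldl_cons, List.filter_cons]
    by_cases hv : (v == closest) = true
    · rw [if_pos hv, hv]
      have hins := ih (d.insert k closest)
        (by
          rw [PySem.Dict.keys_insert_of_not_contains _ _ hkf]
          simp only [List.map_cons] at hlnd
          refine List.Nodup.append hnd (by simp) ?_
          intro a ha hb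
          simp only [List.mem_singleton] at hb; subst hb
          have hc : d.contains a = true := (PySem.Dict.contains_iff_mem_keys d a).mpr ha
          rw [hkf] at hc; exact absurd hc (by simp))
        (by
          intro x hx
          rw [PySem.Dict.contains_insert]
          have hx1 : d.contains x.1 = false := hfresh x (by simp [hx])
          have : x.1 ≠ k := by
            simp only [List.map_cons, List.nodup_cons] at hlnd
            intro h; exact hlnd.1 (h ▸ List.mem_map_of_mem hx)
          simp [hx1, this])
        (by simp only [List.map_cons, List.nodup_cons] at hlnd; exact hlnd.2)
      rw [hins, PySem.Dict.items_insert_of_not_contains _ _ hkf]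
      simp
    · have hvf : (v == closest) = false := Bool.eq_false_iff.mpr hv
      rw [if_neg hv, hvf]
      simp only [Bool.false_eq_true, if_false]
      exact ih d hnd (fun x hx => hfresh x (by simp [hx]))
        (by simp only [List.map_cons, List.nodup_cons] at hlnd; exact hlnd.2)

-- ===== VERDICT (by name: the statement is the Claim_ definition above) =====
theorem calc_closest_val_spec : Claim_equal_calc_closest_val := by
  intro p_dict check_max _ hpre
  obtain ⟨hne, hnd⟩ := hpre
  unfold Spec_calc_closest_val
  match p_dict, hne with
  | (k, v) :: t, _ =>
    have hclosest :
        (if check_max then PySem.List.max? (((k, v) :: t).map Prod.snd) (fun y => y)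
         else PySem.List.min? (((k, v) :: t).map Prod.snd) (fun y => y))
          = some (pvExt check_max v (t.map Prod.snd)) := by
      cases check_max <;>
        simp [PySem.List.min?_id_cons, PySem.List.max?_id_cons,
          pvExt_eq_foldl_min, pvExt_eq_foldl_max]
    set m := pvExt check_max v (t.map Prod.snd) with hm
    rw [calc_closest_val, hclosest]
    show (((k, v) :: t).foldl
        (fun (res : PySem.Dict String Int) kv =>
          if kv.2 == m then res.insert kv.1 m else res)
        PySem.Dict.empty).items = calc_closest_val_alt ((k, v) :: t) check_max
    rw [aFold_items m ((k, v) :: t) PySem.Dict.empty (by simp)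
      (by intro x _; simp) hnd]
    rw [calc_closest_val_alt, calcClosestLoop_spec, ← hm, List.filter_cons]
    by_cases hvm : v = m
    · have hb1 : (v == m) = true := by rw [hvm]; exact beq_self_eq_true m
      simp [hb1, hvm, PySem.Dict.empty]
    · have hb1 : (v == m) = false := by
        simp only [beq_eq_false_iff_ne, ne_eq]; exact hvm
      simp [hb1, Ne.symm hvm, PySem.Dict.empty]
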